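-- pv_equiv track=rewrite | github.com/mekaeli/ELE767_CODES | lab1/projet1.py | _build_layer_sizes
-- ===== SOURCE A (Python) =====
-- from typing import Dict, List, Sequence, Tuple
--
-- def _build_layer_sizes(nx: int, nc: int, nsc1: int, nsc2: int, ncs: int) -> List[int]:
-- 	"""Construit la taille de chaque couche.
--
-- 	Convention:
-- 		- Couche 0 = entrées: nx
-- 		- Couche 1 = cachée 1: nsc1
-- 		- Couche 2 = cachée 2: nsc2
-- 		- Couche (nc-1) = sortie: ncs
-- 		- Les autres couches (si nc > 4) ont ncs neurones.
-- 	"""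
--
-- 	if nx <= 0:
-- 		raise ValueError("nx doit être > 0")
-- 	if nc < 2:
-- 		raise ValueError("nc doit être >= 2 (au moins une couche de sortie)")
-- 	if nsc1 <= 0 or nsc2 <= 0 or ncs <= 0:
-- 		raise ValueError("nsc1, nsc2, ncs doivent être > 0")
--
-- 	sizes = [nx]
-- 	for layer_index in range(1, nc):
-- 		if layer_index == 1:
-- 			sizes.append(nsc1)
-- 		elif layer_index == 2:
-- 			sizes.append(nsc2)
-- 		elif layer_index == nc - 1:
-- 			sizes.append(ncs)
-- 		else:
-- 			sizes.append(ncs)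
-- 	return sizes
-- ===== SOURCE B (Python) =====
-- def _build_layer_sizes(nx: int, nc: int, nsc1: int, nsc2: int, ncs: int):
-- 	if nx <= 0:
-- 		raise ValueError("nx doit être > 0")
-- 	if nc < 2:
-- 		raise ValueError("nc doit être >= 2 (au moins une couche de sortie)")
-- 	if nsc1 <= 0 or nsc2 <= 0 or ncs <= 0:
-- 		raise ValueError("nsc1, nsc2, ncs doivent être > 0")
-- 	return [nx, nsc1, nsc2][:nc] + [ncs] * (nc - 3)
-- ===== Notes on version B (the rewrite author's own statement) =====
-- stated objective: simpler
-- what changed: Replaced the per-index loop with its four-way branch by a closed-form construction: slice [nx, nsc1, nsc2][:nc] plus a repetition [ncs]*(nc-3); the validation checks are kept verbatim so exceptions match.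
import Mathlib
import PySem

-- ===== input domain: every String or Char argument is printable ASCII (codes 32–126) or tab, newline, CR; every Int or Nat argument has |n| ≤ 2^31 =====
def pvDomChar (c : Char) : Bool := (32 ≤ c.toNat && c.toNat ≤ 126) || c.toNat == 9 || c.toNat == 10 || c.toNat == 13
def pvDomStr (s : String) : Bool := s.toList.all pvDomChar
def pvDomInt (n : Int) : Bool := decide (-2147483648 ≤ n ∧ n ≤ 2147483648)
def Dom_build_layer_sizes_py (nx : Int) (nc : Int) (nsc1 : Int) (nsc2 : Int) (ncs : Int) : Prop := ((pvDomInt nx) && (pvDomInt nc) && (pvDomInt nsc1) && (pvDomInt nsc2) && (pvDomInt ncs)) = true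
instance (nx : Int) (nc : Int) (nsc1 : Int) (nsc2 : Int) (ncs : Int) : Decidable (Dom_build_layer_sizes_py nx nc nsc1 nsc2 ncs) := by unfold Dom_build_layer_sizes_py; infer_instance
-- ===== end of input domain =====

-- B replaces A's per-index loop with a closed-form slice-plus-repetition; validation checks kept verbatim (objective: simpler).

-- ===== PORT A =====
-- the three 'raise ValueError' branches return [] here; Pre_ excludes exactly those inputs
def build_layer_sizes_py (nx : Int) (nc : Int) (nsc1 : Int) (nsc2 : Int) (ncs : Int) : List Int :=
  if nx ≤ 0 then []
  else if nc < 2 then []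
  else if nsc1 ≤ 0 ∨ nsc2 ≤ 0 ∨ ncs ≤ 0 then []
  else
    (PySem.List.pyRange 1 nc 1).foldl (fun sizes layer_index =>
      if layer_index = 1 then sizes ++ [nsc1]
      else if layer_index = 2 then sizes ++ [nsc2]
      else if layer_index = nc - 1 then sizes ++ [ncs]
      else sizes ++ [ncs]) [nx]

-- ===== PORT B =====
-- [nx, nsc1, nsc2][:nc] + [ncs] * (nc - 3)   (Python's negative repetition count gives [], hence .toNat)
def build_layer_sizes_py_alt (nx : Int) (nc : Int) (nsc1 : Int) (nsc2 : Int) (ncs : Int) : List Int :=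
  if nx ≤ 0 then []
  else if nc < 2 then []
  else if nsc1 ≤ 0 ∨ nsc2 ≤ 0 ∨ ncs ≤ 0 then []
  else
    PySem.List.slice [nx, nsc1, nsc2] none (some nc) ++ List.replicate (nc - 3).toNat ncs

-- ===== PRECONDITION & SPEC =====
-- Pre_ excludes exactly the inputs on which A raises ValueError (its three validation checks)
def Pre_build_layer_sizes_py (nx : Int) (nc : Int) (nsc1 : Int) (nsc2 : Int) (ncs : Int) : Prop :=
  0 < nx ∧ 2 ≤ nc ∧ 0 < nsc1 ∧ 0 < nsc2 ∧ 0 < ncs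
instance (nx : Int) (nc : Int) (nsc1 : Int) (nsc2 : Int) (ncs : Int) : Decidable (Pre_build_layer_sizes_py nx nc nsc1 nsc2 ncs) := by unfold Pre_build_layer_sizes_py; infer_instance
def pvWitness_build_layer_sizes_py : Int × Int × Int × Int × Int := (3, 5, 4, 4, 2)

def Spec_build_layer_sizes_py (nx : Int) (nc : Int) (nsc1 : Int) (nsc2 : Int) (ncs : Int) (out : List Int) : Prop := out = build_layer_sizes_py_alt nx nc nsc1 nsc2 ncs
instance (nx : Int) (nc : Int) (nsc1 : Int) (nsc2 : Int) (ncs : Int) (out : List Int) : Decidable (Spec_build_layer_sizes_py nx nc nsc1 nsc2 ncs out) := by unfold Spec_build_layer_sizes_py; infer_instance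

-- ===== CLAIM (what is proved, stated in full; the proofs are below) =====
def Claim_equal_build_layer_sizes_py : Prop := ∀ (nx : Int) (nc : Int) (nsc1 : Int) (nsc2 : Int) (ncs : Int), Dom_build_layer_sizes_py nx nc nsc1 nsc2 ncs → Pre_build_layer_sizes_py nx nc nsc1 nsc2 ncs → Spec_build_layer_sizes_py nx nc nsc1 nsc2 ncs (build_layer_sizes_py nx nc nsc1 nsc2 ncs)

-- ===== LEMMAS AND PROOFS =====

-- A's loop appends one element per index: [nx] ++ map over the range
theorem bls_loop_eq_map (nx nc nsc1 nsc2 ncs : Int) :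
    (PySem.List.pyRange 1 nc 1).foldl (fun sizes layer_index =>
      if layer_index = 1 then sizes ++ [nsc1]
      else if layer_index = 2 then sizes ++ [nsc2]
      else if layer_index = nc - 1 then sizes ++ [ncs]
      else sizes ++ [ncs]) [nx]
    = [nx] ++ (PySem.List.pyRange 1 nc 1).map
        (fun i => if i = 1 then nsc1 else if i = 2 then nsc2 else ncs) := by
  have hbody : (fun (sizes : List Int) (layer_index : Int) =>
      if layer_index = 1 then sizes ++ [nsc1]
      else if layer_index = 2 then sizes ++ [nsc2]
      else if layer_index = nc - 1 then sizes ++ [ncs]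
      else sizes ++ [ncs])
      = (fun sizes i => sizes ++ [if i = 1 then nsc1 else if i = 2 then nsc2 else ncs]) := by
    funext sizes i
    split_ifs <;> rfl
  rw [hbody, PySem.List.foldl_append_singleton_eq_map]

theorem bls_map_tail (nc nsc1 nsc2 ncs : Int) (h : 3 ≤ nc) :
    (PySem.List.pyRange 1 nc 1).map
        (fun i => if i = 1 then nsc1 else if i = 2 then nsc2 else ncs)
    = [nsc1, nsc2] ++ List.replicate (nc - 3).toNat ncs := by
  rw [PySem.List.pyRange_one_append 1 3 nc (by omega) h]
  rw [show PySem.List.pyRange 1 3 1 = [1, 2] from by decide]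
  rw [List.map_append]
  have htail : (PySem.List.pyRange 3 nc 1).map
      (fun i => if i = 1 then nsc1 else if i = 2 then nsc2 else ncs)
      = (PySem.List.pyRange 3 nc 1).map (fun _ => ncs) := by
    apply List.map_congr_left
    intro i hi
    have := (PySem.List.mem_pyRange_one.mp hi).1
    have h1 : i ≠ 1 := by omega
    have h2 : i ≠ 2 := by omega
    simp [h1, h2]
  rw [htail, List.map_const']
  simp [PySem.List.length_pyRange_one]

theorem build_layer_sizes_py_spec : Claim_equal_build_layer_sizes_py := by
  intro nx nc nsc1 nsc2 ncs _ hpre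
  obtain ⟨h1, h2, h3, h4, h5⟩ := hpre
  unfold Spec_build_layer_sizes_py build_layer_sizes_py build_layer_sizes_py_alt
  rw [if_neg (by omega), if_neg (by omega), if_neg (by omega),
      if_neg (by omega), if_neg (by omega), if_neg (by omega)]
  rw [bls_loop_eq_map]
  rcases eq_or_lt_of_le h2 with hnc2 | hnc3
  · -- nc = 2
    subst_eqs
    rw [show PySem.List.pyRange 1 2 1 = [1] from by decide]
    rw [show ((2:Int)) = ((2:Nat):Int) from rfl, PySem.List.slice_to_natCast]
    simp
  · -- nc ≥ 3: the slice keeps the whole three-element list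
    have h3nc : 3 ≤ nc := by omega
    rw [bls_map_tail nc nsc1 nsc2 ncs h3nc]
    have : PySem.List.slice [nx, nsc1, nsc2] none (some nc) = [nx, nsc1, nsc2] := by
      have hcast : ((nc.toNat : Nat) : Int) = nc := Int.toNat_of_nonneg (by omega)
      rw [← hcast, PySem.List.slice_to_natCast]
      exact List.take_of_length_le (by simp; omega)
    rw [this]
    simp
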